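-- pv_equiv track=rewrite | github.com/ar1st1d3/ns1 | master_mind.py | duplicate_digits
-- ===== SOURCE A (Python) =====
-- def duplicate_digits(mot):
--     digit_seen = set()  # Set to store the digits already seen
--
--     for digit in mot:
--         if digit in digit_seen:
--             return True  # The digit has already been seen, so there is a duplication
--         else:
--             digit_seen.add(digit)  # Add the digit to the set of seen digits
--
--     return False
-- ===== SOURCE B (Python) =====
-- def duplicate_digits(mot):
--     s = sorted(mot)
--     for i in range(1, len(s)):
--         if s[i - 1] == s[i]:
--             return True
--     return False
-- ===== Notes on version B (the rewrite author's own statement) =====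
-- stated objective: alternative
-- what changed: Replaces the hash-set single-pass scan with sort-then-scan: sort the characters and report a duplicate iff two adjacent sorted characters are equal.
import Mathlib
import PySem

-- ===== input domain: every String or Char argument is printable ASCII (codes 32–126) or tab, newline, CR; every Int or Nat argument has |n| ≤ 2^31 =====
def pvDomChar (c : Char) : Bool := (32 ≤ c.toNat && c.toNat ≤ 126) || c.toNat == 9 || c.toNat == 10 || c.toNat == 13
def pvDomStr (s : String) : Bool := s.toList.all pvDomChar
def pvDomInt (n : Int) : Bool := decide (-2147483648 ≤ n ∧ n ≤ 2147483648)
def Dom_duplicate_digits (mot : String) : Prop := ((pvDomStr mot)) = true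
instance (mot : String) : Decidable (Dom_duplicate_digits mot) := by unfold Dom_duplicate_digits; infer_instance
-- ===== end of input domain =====

-- B replaces A's incremental seen-set scan by sort-then-scan: sort the characters, then a duplicate exists iff two adjacent sorted characters are equal. Same result, no speed claim.
-- ===== PORT A =====
def dupGo : List Char → PySem.Set Char → Bool
  | [], _ => false
  | c :: rest, seen =>
    if PySem.Set.contains seen c then true
    else dupGo rest (PySem.Set.add seen c)

def duplicate_digits (mot : String) : Bool :=
  dupGo mot.toList PySem.Set.empty

-- ===== PORT B =====
-- the adjacent scan of Source B's for-loop over range(1, len(s)): compare each element with its predecessor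
def adjDup : List Char → Bool
  | a :: b :: rest => if a == b then true else adjDup (b :: rest)
  | _ => false

def duplicate_digits_alt (mot : String) : Bool :=
  adjDup (PySem.List.sorted mot.toList (fun c => c) false)

-- ===== PRECONDITION & SPEC =====
def Spec_duplicate_digits (mot : String) (out : Bool) : Prop := out = duplicate_digits_alt mot
instance (mot : String) (out : Bool) : Decidable (Spec_duplicate_digits mot out) := by unfold Spec_duplicate_digits; infer_instance

-- ===== CLAIM (what is proved, stated in full; the proofs are below) =====
def Claim_equal_duplicate_digits : Prop := ∀ (mot : String), Dom_duplicate_digits mot → Spec_duplicate_digits mot (duplicate_digits mot)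

-- ===== LEMMAS AND PROOFS =====
lemma dupGo_eq (l : List Char) : ∀ (seen : PySem.Set Char),
    dupGo l seen = decide (¬ (l.Nodup ∧ ∀ c ∈ l, c ∉ seen)) := by
  induction l with
  | nil => intro seen; simp [dupGo]
  | cons c rest ih =>
    intro seen
    by_cases h : c ∈ seen
    · simp [dupGo, h]
    · rw [dupGo, if_neg (by simpa [PySem.Set.contains_iff] using h), ih]
      rw [decide_eq_decide, not_iff_not]
      simp only [List.nodup_cons, PySem.Set.mem_add]
      constructor
      · rintro ⟨hd, hs⟩
        refine ⟨⟨fun hc => hs c hc (Or.inr rfl), hd⟩, ?_⟩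
        intro x hx
        rcases List.mem_cons.1 hx with rfl | hx
        · exact h
        · exact fun hin => hs x hx (Or.inl hin)
      · rintro ⟨⟨hc, hd⟩, hs⟩
        refine ⟨hd, fun x hx hm => ?_⟩
        rcases hm with hin | rfl
        · exact hs x (List.mem_cons_of_mem _ hx) hin
        · exact hc hx

lemma adjDup_eq_of_sorted : ∀ (l : List Char), l.Pairwise (· ≤ ·) →
    adjDup l = decide (¬ l.Nodup)
  | [], _ => by simp [adjDup]
  | [a], _ => by simp [adjDup]
  | a :: b :: rest, h => by
    rcases List.pairwise_cons.1 h with ⟨hle, htail⟩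
    by_cases hab : a = b
    · subst hab
      simp [adjDup]
    · rw [adjDup, if_neg (by simpa using hab), adjDup_eq_of_sorted (b :: rest) htail]
      rw [decide_eq_decide, not_iff_not]
      have hlt : a < b := lt_of_le_of_ne (hle b (by simp)) hab
      constructor
      · intro hn
        refine List.nodup_cons.2 ⟨?_, hn⟩
        intro hmem
        rcases List.mem_cons.1 hmem with rfl | hmem
        · exact hab rfl
        · have : b ≤ a := (List.pairwise_cons.1 htail).1 a hmem
          exact absurd (lt_of_lt_of_le hlt this) (lt_irrefl a)
      · exact fun hn => (List.nodup_cons.1 hn).2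

-- ===== VERDICT (by name: the statement is the Claim_ definition above) =====
theorem duplicate_digits_spec : Claim_equal_duplicate_digits := by
  intro mot _
  unfold Spec_duplicate_digits duplicate_digits duplicate_digits_alt
  rw [dupGo_eq, adjDup_eq_of_sorted _ (by simpa using PySem.List.sorted_pairwise mot.toList (fun c => c))]
  rw [decide_eq_decide, not_iff_not]
  rw [List.Perm.nodup_iff (PySem.List.sorted_perm mot.toList (fun c => c) false)]
  simp [PySem.Set.empty]
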